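-- pv_equiv track=rewrite | github.com/mchabanat/BUT-Informatique | S3/R3.09 - Cryptographie/script.py | scindermod
-- ===== SOURCE A (Python) =====
-- def scindermod(texte,longueur):
--     texteScinde = []
--     for i in range(longueur):
--         chaine=''
--         for j in range(len(texte)):
--             if j%longueur==i:
--                 chaine+=texte[j]
--         texteScinde.append(chaine)
--     return texteScinde
-- ===== SOURCE B (Python) =====
-- def scindermod(texte, longueur):
--     buckets = [[] for _ in range(longueur)]
--     if buckets:
--         for j, c in enumerate(texte):
--             buckets[j % longueur].append(c)
--     return [''.join(b) for b in buckets]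
-- ===== Notes on version B (the rewrite author's own statement) =====
-- stated objective: faster
-- what changed: replaces the double loop (one full scan of the text per residue class) by a single pass that appends each character to bucket j % longueur, joining the buckets at the end
import Mathlib
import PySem

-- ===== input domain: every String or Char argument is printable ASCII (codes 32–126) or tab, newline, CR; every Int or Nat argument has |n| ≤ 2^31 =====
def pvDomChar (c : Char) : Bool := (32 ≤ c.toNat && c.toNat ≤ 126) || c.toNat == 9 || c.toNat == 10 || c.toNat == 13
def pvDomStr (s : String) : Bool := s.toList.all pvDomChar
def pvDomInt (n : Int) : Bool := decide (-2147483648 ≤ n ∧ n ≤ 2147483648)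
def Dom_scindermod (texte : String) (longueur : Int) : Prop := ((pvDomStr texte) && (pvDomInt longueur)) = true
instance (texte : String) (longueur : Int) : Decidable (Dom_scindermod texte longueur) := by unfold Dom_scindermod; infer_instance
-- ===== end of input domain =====

-- B replaces A's double loop (one full scan of the text per residue class) by a single pass
-- appending each character to bucket j % longueur (objective: faster, asymptotic O(n*L) → O(n+L)).

-- ===== PORT A =====
-- strings are handled as List Char accumulators and packed with String.ofList at the end
-- (Lean's own String.append is opaque to the kernel); texte[j] is ported as pyGetD with an
-- unreachable default, exact since j ranges over range(len(texte)).
def scindermod (texte : String) (longueur : Int) : List String :=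
  (PySem.List.pyRange 0 longueur 1).foldl (fun texteScinde i =>
    let chaine : List Char :=
      (PySem.List.pyRange 0 (PySem.Str.len texte) 1).foldl (fun ch j =>
        if PySem.Int.mod j longueur = i then ch ++ [PySem.List.pyGetD texte.toList j ' '] else ch) []
    texteScinde ++ [String.ofList chaine]) []

-- ===== PORT B =====
-- buckets[k].append(c) becomes bs.set k (bs.getD k [] ++ [c]); the index j % longueur is
-- nonnegative (0 < longueur inside the guarded loop), so .toNat is exact.
def scindermod_alt (texte : String) (longueur : Int) : List String :=
  let buckets : List (List Char) := (PySem.List.pyRange 0 longueur 1).map (fun _ => ([] : List Char))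
  let buckets :=
    if buckets.isEmpty then buckets
    else
      (PySem.List.enumerate texte.toList 0).foldl (fun bs p =>
        let k := (PySem.Int.mod p.1 longueur).toNat
        bs.set k (bs.getD k [] ++ [p.2])) buckets
  buckets.map String.ofList

-- ===== PRECONDITION & SPEC =====
def Spec_scindermod (texte : String) (longueur : Int) (out : List String) : Prop := out = scindermod_alt texte longueur
instance (texte : String) (longueur : Int) (out : List String) : Decidable (Spec_scindermod texte longueur out) := by unfold Spec_scindermod; infer_instance

-- ===== CLAIM (what is proved, stated in full; the proofs are below) =====
def Claim_equal_scindermod : Prop := ∀ (texte : String) (longueur : Int), Dom_scindermod texte longueur → Spec_scindermod texte longueur (scindermod texte longueur)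

-- ===== LEMMAS AND PROOFS =====

-- the subsequence of cs at indices ≡ i (mod L): the common characterisation of both programs
def pvRow (cs : List Char) (L i : Int) : List Char :=
  ((PySem.List.pyRange 0 (cs.length : Int) 1).filter
      (fun j => decide (PySem.Int.mod j L = i))).map
    (fun j => PySem.List.pyGetD cs j ' ')

theorem pvRow_nil (L i : Int) : pvRow [] L i = [] := by
  simp [pvRow]

theorem pvRow_snoc (ds : List Char) (c : Char) (L i : Int) :
    pvRow (ds ++ [c]) L i
      = pvRow ds L i ++ (if PySem.Int.mod (ds.length : Int) L = i then [c] else []) := by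
  unfold pvRow
  have hlen : ((ds ++ [c]).length : Int) = (ds.length : Int) + 1 := by
    simp
  rw [hlen, PySem.List.pyRange_one_succ_right (by positivity), List.filter_append, List.map_append]
  congr 1
  · apply List.map_congr_left
    intro j hj
    have hj' : j ∈ PySem.List.pyRange 0 (ds.length : Int) 1 := List.mem_of_mem_filter hj
    rw [PySem.List.mem_pyRange_one] at hj'
    obtain ⟨h0, h1⟩ := hj'
    rw [PySem.List.pyGetD_of_nonneg _ _ h0, PySem.List.pyGetD_of_nonneg _ _ h0]
    have hlt : j.toNat < ds.length := by omega
    rw [List.getD_eq_getElem?_getD, List.getD_eq_getElem?_getD,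
        List.getElem?_append_left hlt]
  · by_cases h : PySem.Int.mod (ds.length : Int) L = i
    · simp only [List.filter_singleton, h]
      simp [PySem.List.pyGetD_of_nonneg _ _ (by positivity : (0:Int) ≤ (ds.length : Int)),
            List.getD_eq_getElem?_getD]
    · simp [h]

-- effect of one buckets[k].append(c) step on the rows-of-the-prefix bucket list
theorem pvSet_row (L : Int) (hL : 0 < L) (ds : List Char) (c : Char) :
    ((PySem.List.pyRange 0 L 1).map (fun i => pvRow ds L i)).set
        (PySem.Int.mod (ds.length : Int) L).toNat
        (((PySem.List.pyRange 0 L 1).map (fun i => pvRow ds L i)).getD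
            (PySem.Int.mod (ds.length : Int) L).toNat [] ++ [c])
      = (PySem.List.pyRange 0 L 1).map (fun i => pvRow (ds ++ [c]) L i) := by
  have hmodnn : 0 ≤ PySem.Int.mod (ds.length : Int) L := PySem.Int.mod_nonneg _ hL
  have hmodlt : PySem.Int.mod (ds.length : Int) L < L := PySem.Int.mod_lt _ hL
  apply List.ext_getElem
  · simp
  · intro m hm1 hm2
    have hmL : m < L.toNat := by
      simpa [PySem.List.length_pyRange_one] using hm2
    have hmlen : m < ((PySem.List.pyRange 0 L 1).map (fun i => pvRow ds L i)).length := by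
      simpa [PySem.List.length_pyRange_one] using hmL
    rw [List.getElem_set]
    conv_rhs => rw [List.getElem_map, PySem.List.getElem_pyRange_one, pvRow_snoc]
    by_cases hmk : (PySem.Int.mod (ds.length : Int) L).toNat = m
    · rw [if_pos hmk]
      have hgd : ((PySem.List.pyRange 0 L 1).map (fun i => pvRow ds L i)).getD
          (PySem.Int.mod (ds.length : Int) L).toNat [] = pvRow ds L (0 + (m : Int)) := by
        rw [hmk, List.getD_eq_getElem?_getD, List.getElem?_eq_getElem hmlen]
        simp [PySem.List.getElem_pyRange_one]
      have hcond : PySem.Int.mod (ds.length : Int) L = 0 + (m : Int) := by omega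
      rw [hgd, if_pos hcond]
    · rw [if_neg hmk]
      have hcond : ¬ PySem.Int.mod (ds.length : Int) L = 0 + (m : Int) := by omega
      rw [if_neg hcond, List.append_nil, List.getElem_map, PySem.List.getElem_pyRange_one]

theorem pvBucket_inv (L : Int) (hL : 0 < L) (cs : List Char) :
    (PySem.List.enumerate cs 0).foldl
        (fun bs p =>
          let k := (PySem.Int.mod p.1 L).toNat
          bs.set k (bs.getD k [] ++ [p.2]))
        ((PySem.List.pyRange 0 L 1).map (fun _ => ([] : List Char)))
      = (PySem.List.pyRange 0 L 1).map (fun i => pvRow cs L i) := by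
  induction cs using List.reverseRecOn with
  | nil =>
      simp [PySem.List.enumerate_nil, pvRow_nil]
  | append_singleton ds c ih =>
      rw [PySem.List.enumerate_append, List.foldl_append, ih]
      simp only [PySem.List.enumerate_cons, PySem.List.enumerate_nil, List.foldl_cons,
        List.foldl_nil, zero_add]
      exact pvSet_row L hL ds c

theorem scindermod_eq_rows (texte : String) (L : Int) :
    scindermod texte L
      = (PySem.List.pyRange 0 L 1).map (fun i => String.ofList (pvRow texte.toList L i)) := by
  unfold scindermod
  rw [PySem.List.foldl_append_singleton_eq_map]
  simp only [List.nil_append]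
  apply List.map_congr_left
  intro i _
  congr 1
  unfold pvRow
  rw [PySem.List.foldl_append_ite (p := fun j => PySem.Int.mod j L = i)
        (f := fun j => PySem.List.pyGetD texte.toList j ' ')]
  simp [PySem.Str.len_eq]

-- ===== VERDICT (by name: the statement is the Claim_ definition above) =====
theorem scindermod_spec : Claim_equal_scindermod := by
  intro texte longueur _
  unfold Spec_scindermod
  rw [scindermod_eq_rows]
  unfold scindermod_alt
  by_cases hL : 0 < longueur
  · have hne : ¬ ((PySem.List.pyRange 0 longueur 1).map (fun _ => ([] : List Char))).isEmpty := by
      rw [List.isEmpty_iff, List.map_eq_nil_iff, ← List.length_eq_zero_iff,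
        PySem.List.length_pyRange_one]
      omega
    simp only [if_neg hne]
    rw [pvBucket_inv longueur hL texte.toList]
    simp [List.map_map, Function.comp]
  · have hnil : PySem.List.pyRange 0 longueur 1 = [] :=
      PySem.List.pyRange_one_eq_nil (by omega)
    simp [hnil]
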